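-- pv_equiv track=rewrite | github.com/FrancoARossi/SySdL-TPs | pruebas.py | a_OpRel2
-- ===== SOURCE A (Python) =====
-- def a_OpRel2(word):
-- 	s = 0
-- 	for c in word:
-- 		if s == 0 and c == '<':
-- 			s = 1
-- 		else:
-- 			s = -1
-- 			break
-- 	return (s == 1)
-- ===== SOURCE B (Python) =====
-- def a_OpRel2(word):
-- 	items = list(word)
-- 	return len(items) == 1 and items[0] == '<'
-- ===== Notes on version B (the rewrite author's own statement) =====
-- stated objective: simpler
-- what changed: Replaced A's stateful break-loop (a state machine over the characters) with a build-then-check decomposition: materialize the characters into a list and test that it has length one with its head the expected operator character.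
import Mathlib
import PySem

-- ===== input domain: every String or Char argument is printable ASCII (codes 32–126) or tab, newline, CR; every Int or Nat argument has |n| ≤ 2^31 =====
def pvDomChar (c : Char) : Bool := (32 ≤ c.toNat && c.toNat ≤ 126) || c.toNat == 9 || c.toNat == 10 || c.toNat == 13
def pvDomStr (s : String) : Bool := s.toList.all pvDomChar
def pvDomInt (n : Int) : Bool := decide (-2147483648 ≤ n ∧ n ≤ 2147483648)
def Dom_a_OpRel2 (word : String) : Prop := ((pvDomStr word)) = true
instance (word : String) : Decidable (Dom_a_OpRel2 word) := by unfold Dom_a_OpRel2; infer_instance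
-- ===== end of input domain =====

-- B replaces A's stateful break-loop with a materialize-then-check decomposition; same result on every string.

-- ===== PORT A =====
-- the for-loop with break: state s, stop (returning -1) as soon as the else branch fires
def a_OpRel2_loop (s : Int) (cs : List Char) : Int :=
  match cs with
  | [] => s
  | c :: rest => if s == 0 && c == '<' then a_OpRel2_loop 1 rest else -1

def a_OpRel2 (word : String) : Bool :=
  a_OpRel2_loop 0 word.toList == 1

-- ===== PORT B =====
def a_OpRel2_alt (word : String) : Bool :=
  let items := word.toList
  items.length == 1 && items[0]? == some '<'

-- ===== PRECONDITION & SPEC =====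
def Spec_a_OpRel2 (word : String) (out : Bool) : Prop := out = a_OpRel2_alt word
instance (word : String) (out : Bool) : Decidable (Spec_a_OpRel2 word out) := by unfold Spec_a_OpRel2; infer_instance

-- ===== CLAIM (what is proved, stated in full; the proofs are below) =====
def Claim_equal_a_OpRel2 : Prop := ∀ (word : String), Dom_a_OpRel2 word → Spec_a_OpRel2 word (a_OpRel2 word)

-- ===== LEMMAS AND PROOFS =====
theorem a_OpRel2_loop_ne_zero (cs : List Char) (s : Int) (h : s ≠ 0) :
    a_OpRel2_loop s cs = if cs = [] then s else -1 := by
  cases cs with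
  | nil => simp [a_OpRel2_loop]
  | cons c rest => simp [a_OpRel2_loop, h]

-- ===== VERDICT (by name: the statement is the Claim_ definition above) =====
theorem a_OpRel2_spec : Claim_equal_a_OpRel2 := by
  intro word _
  unfold Spec_a_OpRel2 a_OpRel2 a_OpRel2_alt
  cases h : word.toList with
  | nil => simp [a_OpRel2_loop]
  | cons c rest =>
    simp only [a_OpRel2_loop]
    by_cases hc : c = '<'
    · subst hc
      rw [if_pos (by decide), a_OpRel2_loop_ne_zero rest 1 (by decide)]
      cases rest <;> simp
    · rw [if_neg (by simp [hc])]
      simp [hc]
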